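-- pv_equiv track=rewrite | github.com/aws-neuron/neuronx-distributed | src/neuronx_distributed/pipeline/partition.py | create_partitions
-- ===== SOURCE A (Python) =====
-- def create_partitions(pipeline_parallel_size, model_layer_names):
--     """
--     Evenly split the transformer layers between the PP ranks.
--     If the transformer layers are not evenly divisible by the PP ranks, we distribute the remaining layers to the
--     latter pipeline ranks.
--     """
--     num_hidden_layers = len(model_layer_names)
--     num_layer_per_partition = num_hidden_layers // pipeline_parallel_size
--     assert num_layer_per_partition >= 1, f"The partition cannot be created; num_hidden_layers should be atleast equal to \
--         pipeline_parallel_size, but found num_hidden_layers = {num_hidden_layers} and pipeline_parallel_size = {pipeline_parallel_size}"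
--     layers_per_partition = [num_layer_per_partition for x in range(pipeline_parallel_size)]
--     remainder = num_hidden_layers % pipeline_parallel_size
--     if remainder > 0:
--         for i in range(-remainder, 0):
--             layers_per_partition[i] += 1
--     assert sum(layers_per_partition) == num_hidden_layers
--
--     pipeline_cuts = []
--     current_cut = 0
--     for layers in layers_per_partition[:-1]:
--         current_cut += layers
--         pipeline_cuts.append(model_layer_names[current_cut - 1])
--     assert len(pipeline_cuts) == (pipeline_parallel_size - 1)
--     return pipeline_cuts
-- ===== SOURCE B (Python) =====
-- def create_partitions(pipeline_parallel_size, model_layer_names):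
--     """
--     Evenly split the transformer layers between the PP ranks, extra layers
--     going to the latter ranks; cut indices computed in closed form.
--     """
--     n = len(model_layer_names)
--     base = n // pipeline_parallel_size
--     assert base >= 1, (
--         "The partition cannot be created; num_hidden_layers should be atleast equal to "
--         f"pipeline_parallel_size, but found num_hidden_layers = {n} and pipeline_parallel_size = {pipeline_parallel_size}"
--     )
--     remainder = n % pipeline_parallel_size
--     cuts = []
--     for i in range(1, pipeline_parallel_size):
--         cut = i * base + max(0, i - (pipeline_parallel_size - remainder))
--         cuts.append(model_layer_names[cut - 1])
--     return cuts
-- ===== Notes on version B (the rewrite author's own statement) =====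
-- stated objective: simpler
-- what changed: B drops A's per-rank size list, remainder-distribution loop and running accumulator, computing each cut index directly in closed form (i*base + max(0, i-(P-remainder))) in a single pass over the ranks.
import Mathlib
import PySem

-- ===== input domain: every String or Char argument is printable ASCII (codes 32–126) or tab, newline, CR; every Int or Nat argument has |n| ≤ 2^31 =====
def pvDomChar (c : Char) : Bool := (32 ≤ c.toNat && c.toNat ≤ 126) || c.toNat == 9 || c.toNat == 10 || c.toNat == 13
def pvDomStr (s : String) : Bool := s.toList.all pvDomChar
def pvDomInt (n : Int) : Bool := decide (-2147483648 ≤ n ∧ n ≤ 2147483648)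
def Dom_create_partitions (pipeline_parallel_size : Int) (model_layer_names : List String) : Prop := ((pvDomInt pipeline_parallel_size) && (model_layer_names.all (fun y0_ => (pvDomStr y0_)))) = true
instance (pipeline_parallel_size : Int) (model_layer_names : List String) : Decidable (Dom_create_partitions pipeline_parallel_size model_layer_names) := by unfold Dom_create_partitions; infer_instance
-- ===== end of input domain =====

-- B replaces A's size-list construction, remainder-distribution loop and running
-- accumulator by one pass computing each cut index in closed form (objective: simpler).

-- ===== PORT A =====
def create_partitions (pipeline_parallel_size : Int) (model_layer_names : List String) : List String :=
  let num_hidden_layers : Int := model_layer_names.length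
  let num_layer_per_partition : Int := PySem.Int.floordiv num_hidden_layers pipeline_parallel_size
  -- assert num_layer_per_partition >= 1  (raises outside Pre_)
  let layers_per_partition : List Int :=
    (PySem.List.pyRange 0 pipeline_parallel_size 1).map (fun _ => num_layer_per_partition)
  let remainder : Int := PySem.Int.mod num_hidden_layers pipeline_parallel_size
  let layers_per_partition : List Int :=
    if remainder > 0 then
      (PySem.List.pyRange (-remainder) 0 1).foldl
        (fun l i => PySem.List.pySetD l i (PySem.List.pyGetD l i 0 + 1)) layers_per_partition
    else layers_per_partition
  let st :=
    (PySem.List.slice layers_per_partition none (some (-1))).foldl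
      (fun (st : List String × Int) layers =>
        let current_cut := st.2 + layers
        (st.1 ++ [PySem.List.pyGetD model_layer_names (current_cut - 1) ""], current_cut))
      ([], 0)
  st.1

-- ===== PORT B =====
def create_partitions_alt (pipeline_parallel_size : Int) (model_layer_names : List String) : List String :=
  let n : Int := model_layer_names.length
  let base : Int := PySem.Int.floordiv n pipeline_parallel_size
  -- assert base >= 1  (raises outside Pre_)
  let remainder : Int := PySem.Int.mod n pipeline_parallel_size
  (PySem.List.pyRange 1 pipeline_parallel_size 1).map
    (fun i =>
      PySem.List.pyGetD model_layer_names
        (i * base + max 0 (i - (pipeline_parallel_size - remainder)) - 1) "")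

-- ===== PRECONDITION & SPEC =====
-- Pre_ excludes exactly the inputs where A raises: ZeroDivisionError for
-- pipeline_parallel_size = 0, AssertionError when len // pipeline_parallel_size < 1
-- (i.e. pipeline_parallel_size < 0 or pipeline_parallel_size > len).
def Pre_create_partitions (pipeline_parallel_size : Int) (model_layer_names : List String) : Prop :=
  1 ≤ pipeline_parallel_size ∧ pipeline_parallel_size ≤ model_layer_names.length

instance (pipeline_parallel_size : Int) (model_layer_names : List String) : Decidable (Pre_create_partitions pipeline_parallel_size model_layer_names) := by unfold Pre_create_partitions; infer_instance

def pvWitness_create_partitions : Int × List String := (3, ["a", "b", "c", "d", "e", "f", "g"])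

def Spec_create_partitions (pipeline_parallel_size : Int) (model_layer_names : List String) (out : List String) : Prop := out = create_partitions_alt pipeline_parallel_size model_layer_names
instance (pipeline_parallel_size : Int) (model_layer_names : List String) (out : List String) : Decidable (Spec_create_partitions pipeline_parallel_size model_layer_names out) := by unfold Spec_create_partitions; infer_instance

-- ===== CLAIM (what is proved, stated in full; the proofs are below) =====
def Claim_equal_create_partitions : Prop := ∀ (pipeline_parallel_size : Int) (model_layer_names : List String), Dom_create_partitions pipeline_parallel_size model_layer_names → Pre_create_partitions pipeline_parallel_size model_layer_names → Spec_create_partitions pipeline_parallel_size model_layer_names (create_partitions pipeline_parallel_size model_layer_names)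

-- ===== LEMMAS AND PROOFS =====

theorem pv_pySetD_neg_natCast {α : Type} (xs : List α) (k : Nat) (v : α)
    (hk : 0 < k) (hle : k ≤ xs.length) :
    PySem.List.pySetD xs (-(k : Int)) v = xs.set (xs.length - k) v := by
  have h2 : -(xs.length : Int) ≤ -(k : Int) := by omega
  simp [PySem.List.pySetD, PySem.List.pySet?, PySem.List.pyIdx?, h2, hk.ne']

theorem pv_bump_loop (r : Nat) (l : List Int) (hr : r ≤ l.length) :
    (PySem.List.pyRange (-(r : Int)) 0 1).foldl
        (fun l i => PySem.List.pySetD l i (PySem.List.pyGetD l i 0 + 1)) l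
      = l.take (l.length - r) ++ (l.drop (l.length - r)).map (· + 1) := by
  induction r generalizing l with
  | zero => simp [PySem.List.pyRange_one_eq_nil]
  | succ r ih =>
    have hlt : -((r + 1 : Nat) : Int) < 0 := by omega
    rw [PySem.List.pyRange_one_cons hlt, List.foldl_cons]
    have hcast : -((r + 1 : Nat) : Int) + 1 = -((r : Nat) : Int) := by omega
    rw [hcast]
    have hget : PySem.List.pyGetD l (-((r + 1 : Nat) : Int)) 0 = l[l.length - (r + 1)]'(by omega) := by
      exact PySem.List.pyGetD_neg_natCast l (r + 1) 0 (by omega) hr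
    set i := l.length - (r + 1) with hi
    have hset : PySem.List.pySetD l (-((r + 1 : Nat) : Int))
        (PySem.List.pyGetD l (-((r + 1 : Nat) : Int)) 0 + 1)
        = l.set i (l[i]'(by omega) + 1) := by
      rw [hget]; exact pv_pySetD_neg_natCast l (r + 1) _ (by omega) hr
    rw [hset, ih _ (by simp; omega)]
    have hlen : (l.set i (l[i]'(by omega) + 1)).length = l.length := by simp
    rw [hlen]
    have hiq : l.length - r = i + 1 := by omega
    rw [hiq]
    rw [List.set_eq_take_append_cons_drop, if_pos (show i < l.length by omega)]
    rw [List.take_append, List.take_take]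
    have h5 : (l.take i).length = i := by simp; omega
    simp only [h5]
    have h6 : min (i + 1) i = i := by omega
    rw [h6, List.drop_append, h5]
    have : i + 1 - i = 1 := by omega
    rw [this]
    have e1 : List.drop (i + 1) (List.take (i + 1 + 0) l) = [] := List.drop_eq_nil_of_le (by simp)
    have e2 : List.drop (i + 1) (List.take i l) = [] := List.drop_eq_nil_of_le (by simp only [List.length_take]; omega)
    have e3 : List.drop i l = l[i]'(by omega) :: List.drop (i + 1) l := List.drop_eq_getElem_cons (by omega)
    simp only [List.take_succ_cons, List.drop_succ_cons, e2, e3]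
    simp
    rw [List.drop_eq_getElem_cons (show i < (List.map (fun x : Int => x + 1) l).length by
      simp only [List.length_map]; omega)]
    simp

theorem pv_cut_fold (g : Int → String) (ws : List Int) (acc : List String) (c : Int) :
    (ws.foldl
        (fun (st : List String × Int) w => (st.1 ++ [g (st.2 + w)], st.2 + w))
        (acc, c)).1
      = acc ++ (List.range ws.length).map (fun k => g (c + ((ws.take (k + 1)).sum))) := by
  induction ws generalizing acc c with
  | nil => simp
  | cons w ws ih =>
    simp only [List.foldl_cons, ih, List.length_cons, List.range_succ_eq_map]
    simp [List.map_map, Function.comp_def, add_assoc]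

theorem pv_psum (m r : Nat) (b : Int) (j : Nat) (hj : j ≤ m + r) :
    ((List.replicate m b ++ List.replicate r (b + 1)).take j).sum
      = j * b + max 0 ((j : Int) - m) := by
  rw [List.take_append, List.take_replicate, List.take_replicate]
  simp only [List.sum_append, List.sum_replicate, nsmul_eq_mul, List.length_replicate]
  by_cases h : j ≤ m
  · have h1 : min j m = j := by omega
    have h2 : min (j - m) r = 0 := by omega
    have h3 : max 0 ((j : Int) - m) = 0 := by omega
    rw [h1, h2, h3]; push_cast; ring
  · have h1 : min j m = m := by omega
    have h2 : max 0 ((j : Int) - m) = (j : Int) - m := by omega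
    have h4 : min (j - m) r = j - m := by omega
    have h3 : ((j - m : Nat) : Int) = (j : Int) - m := by omega
    rw [h1, h2, h4, h3]; ring

-- ===== VERDICT (by name: the statement is the Claim_ definition above) =====
theorem create_partitions_spec : Claim_equal_create_partitions := by
  intro P names _hdom hpre
  obtain ⟨h1, h2⟩ := hpre
  unfold Spec_create_partitions create_partitions create_partitions_alt
  simp only []
  have hP : 0 < P := by omega
  set n : Nat := names.length with hn
  set b : Int := PySem.Int.floordiv (n : Int) P with hb
  set rem : Int := PySem.Int.mod (n : Int) P with hrem
  have hremE : rem = (n : Int) % P := PySem.Int.mod_eq_emod_of_pos hP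
  have hrem0 : 0 ≤ rem := by rw [hremE]; exact Int.emod_nonneg _ (by omega)
  have hremP : rem < P := by rw [hremE]; exact Int.emod_lt_of_pos _ hP
  set p : Nat := P.toNat with hp
  have hpP : (p : Int) = P := Int.toNat_of_nonneg (by omega)
  set r : Nat := rem.toNat with hr
  have hrrem : (r : Int) = rem := Int.toNat_of_nonneg hrem0
  have hrp : r < p := by omega
  set m : Nat := p - r with hm
  have hmI : (m : Int) = P - rem := by omega
  -- the initial size list is replicate p b
  have h0 : (PySem.List.pyRange 0 P 1).map (fun _ => b) = List.replicate p b := by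
    rw [List.map_const', PySem.List.length_pyRange_one]
    congr 1; omega
  rw [h0]
  -- after the remainder loop: two-block size list
  have hbump : (if rem > 0 then
      (PySem.List.pyRange (-rem) 0 1).foldl
        (fun l i => PySem.List.pySetD l i (PySem.List.pyGetD l i 0 + 1)) (List.replicate p b)
      else List.replicate p b)
      = List.replicate m b ++ List.replicate r (b + 1) := by
    by_cases hpos : rem > 0
    · rw [if_pos hpos]
      have hcast : -rem = -((r : Nat) : Int) := by omega
      rw [hcast, pv_bump_loop r (List.replicate p b) (by simp; omega)]
      simp only [List.length_replicate, List.take_replicate, List.drop_replicate,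
        List.map_replicate]
      have e1 : min (p - r) p = m := by omega
      have e2 : p - (p - r) = r := by omega
      rw [e1, e2]
    · rw [if_neg hpos]
      have : r = 0 := by omega
      rw [this]
      have : m = p := by omega
      rw [this]
      simp
  rw [hbump, PySem.List.slice_to_neg_one]
  -- dropLast is again a two-block list
  obtain ⟨m', r', hdl, hsum, hmax⟩ :
      ∃ m' r' : Nat, (List.replicate m b ++ List.replicate r (b + 1)).dropLast
          = List.replicate m' b ++ List.replicate r' (b + 1)
        ∧ m' + r' = p - 1
        ∧ ∀ j : Int, j ≤ (p : Int) - 1 → max 0 (j - (m' : Int)) = max 0 (j - (P - rem)) := by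
    rcases Nat.eq_zero_or_pos r with h0r | h0r
    · refine ⟨m - 1, 0, ?_, by omega, ?_⟩
      · rw [h0r]; simp [List.dropLast_replicate]
      · intro j hj
        have : max 0 (j - ((m - 1 : Nat) : Int)) = 0 := by omega
        rw [this]
        have : max 0 (j - (P - rem)) = 0 := by omega
        rw [this]
    · refine ⟨m, r - 1, ?_, by omega, ?_⟩
      · have : r = (r - 1) + 1 := by omega
        rw [this, List.replicate_succ', ← List.append_assoc, List.dropLast_concat]
        norm_num
      · intro j hj
        have : (m : Int) = P - rem := hmI
        rw [this]
  rw [hdl, pv_cut_fold (fun cut => PySem.List.pyGetD names (cut - 1) "") _ [] 0]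
  have hlen2 : (List.replicate m' b ++ List.replicate r' (b + 1)).length = p - 1 := by
    simp; omega
  rw [hlen2, PySem.List.pyRange_one]
  have hP1 : ((P : Int) - 1).toNat = p - 1 := by omega
  rw [hP1, List.map_map, List.nil_append]
  apply List.map_congr_left
  intro k hk
  rw [List.mem_range] at hk
  rw [pv_psum m' r' b (k + 1) (by omega)]
  simp only [Function.comp_def]
  congr 1
  have := hmax ((k : Int) + 1) (by omega)
  push_cast
  rw [this]
  have hc : (1 : Int) + (k : Int) = (k : Int) + 1 := by ring
  rw [hc]
  ring
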